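-- pv_equiv track=rewrite | github.com/pypi-data/pypi-mirror-402 | packages/runbooks/runbooks-1.2.8.tar.gz/runbooks-1.2.8/src/runbooks/operate/privatelink_operations.py | _categorize_available_services
-- ===== SOURCE A (Python) =====
-- from typing import Any, Dict, List, Optional, Set, Tuple
--
-- def _categorize_available_services(service_names: List[str]) -> Dict[str, List[str]]:
--     """Categorize available services by type and provider."""
--     categories = {
--         "aws_managed": [],
--         "customer_managed": [],
--         "compute": [],
--         "storage": [],
--         "database": [],
--         "analytics": [],
--         "security": [],
--         "other": [],
--     }
--
--     for service_name in service_names: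
--         if service_name.startswith("com.amazonaws"):
--             categories["aws_managed"].append(service_name)
--
--             # Categorize by service type
--             if any(svc in service_name for svc in ["ec2", "ecs", "lambda"]):
--                 categories["compute"].append(service_name)
--             elif any(svc in service_name for svc in ["s3", "efs", "fsx"]):
--                 categories["storage"].append(service_name)
--             elif any(svc in service_name for svc in ["rds", "dynamodb", "redshift"]):
--                 categories["database"].append(service_name)
--             elif any(svc in service_name for svc in ["kinesis", "glue", "emr"]):
--                 categories["analytics"].append(service_name)
--             elif any(svc in service_name for svc in ["kms", "secretsmanager", "ssm"]):
--                 categories["security"].append(service_name)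
--             else:
--                 categories["other"].append(service_name)
--         else:
--             categories["customer_managed"].append(service_name)
--
--     return categories
-- ===== SOURCE B (Python) =====
-- from typing import Dict, List
--
-- _TYPE_TABLE = [
--     ("compute", ["ec2", "ecs", "lambda"]),
--     ("storage", ["s3", "efs", "fsx"]),
--     ("database", ["rds", "dynamodb", "redshift"]),
--     ("analytics", ["kinesis", "glue", "emr"]),
--     ("security", ["kms", "secretsmanager", "ssm"]),
-- ]
--
--
-- def _type_of(name: str) -> str:
--     for category, keywords in _TYPE_TABLE:
--         if any(kw in name for kw in keywords):
--             return category
--     return "other"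
--
--
-- def _categorize_available_services(service_names: List[str]) -> Dict[str, List[str]]:
--     aws = [n for n in service_names if n.startswith("com.amazonaws")]
--     return {
--         "aws_managed": aws,
--         "customer_managed": [n for n in service_names if not n.startswith("com.amazonaws")],
--         **{cat: [n for n in aws if _type_of(n) == cat]
--            for cat, _ in _TYPE_TABLE},
--         "other": [n for n in aws if _type_of(n) == "other"],
--     }
-- ===== Notes on version B (the rewrite author's own statement) =====
-- stated objective: idiomatic
-- what changed: Replaces the hard-coded elif chain and per-item dict mutation by a declarative (category, keywords) table with a first-match classifier, building each bucket once as a filter/comprehension of the input instead of appending inside one loop.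
import Mathlib
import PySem

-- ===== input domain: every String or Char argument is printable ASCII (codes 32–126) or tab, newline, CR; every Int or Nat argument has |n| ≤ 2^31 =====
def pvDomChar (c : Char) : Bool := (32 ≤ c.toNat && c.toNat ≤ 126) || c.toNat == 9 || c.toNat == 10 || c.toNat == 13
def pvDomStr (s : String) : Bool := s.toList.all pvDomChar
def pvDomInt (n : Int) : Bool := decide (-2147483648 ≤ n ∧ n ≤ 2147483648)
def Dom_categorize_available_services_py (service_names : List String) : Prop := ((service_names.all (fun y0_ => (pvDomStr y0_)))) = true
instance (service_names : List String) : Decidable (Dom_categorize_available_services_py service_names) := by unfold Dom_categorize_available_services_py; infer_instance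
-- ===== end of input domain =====

-- B replaces A's elif chain with a (category, keywords) table + first-match classifier and
-- builds each bucket once as a filter of the input; idiomatic, same cost.

-- ===== PORT A =====
-- one iteration of A's for-loop over the categories dict
def pvAStep (d : PySem.Dict String (List String)) (s : String) : PySem.Dict String (List String) :=
  if PySem.Str.startswith s "com.amazonaws" then
    let d := d.modify "aws_managed" [] (· ++ [s])
    if ["ec2", "ecs", "lambda"].any (fun k => PySem.Str.isIn k s) then
      d.modify "compute" [] (· ++ [s])
    else if ["s3", "efs", "fsx"].any (fun k => PySem.Str.isIn k s) then
      d.modify "storage" [] (· ++ [s])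
    else if ["rds", "dynamodb", "redshift"].any (fun k => PySem.Str.isIn k s) then
      d.modify "database" [] (· ++ [s])
    else if ["kinesis", "glue", "emr"].any (fun k => PySem.Str.isIn k s) then
      d.modify "analytics" [] (· ++ [s])
    else if ["kms", "secretsmanager", "ssm"].any (fun k => PySem.Str.isIn k s) then
      d.modify "security" [] (· ++ [s])
    else
      d.modify "other" [] (· ++ [s])
  else
    d.modify "customer_managed" [] (· ++ [s])

def categorize_available_services_py (service_names : List String) : List (String × List String) :=
  let categories : PySem.Dict String (List String) := PySem.Dict.mk
    [("aws_managed", []), ("customer_managed", []), ("compute", []), ("storage", []),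
     ("database", []), ("analytics", []), ("security", []), ("other", [])]
  (service_names.foldl pvAStep categories).items

-- ===== PORT B =====
def pvTypeTable : List (String × List String) :=
  [("compute", ["ec2", "ecs", "lambda"]),
   ("storage", ["s3", "efs", "fsx"]),
   ("database", ["rds", "dynamodb", "redshift"]),
   ("analytics", ["kinesis", "glue", "emr"]),
   ("security", ["kms", "secretsmanager", "ssm"])]

-- first-match scan of the table (the for/return loop in Source B)
def pvTypeOf (name : String) : String :=
  match pvTypeTable.find? (fun p => p.2.any (fun kw => PySem.Str.isIn kw name)) with
  | some p => p.1
  | none => "other"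

def categorize_available_services_py_alt (service_names : List String) : List (String × List String) :=
  let aws := service_names.filter (fun n => PySem.Str.startswith n "com.amazonaws")
  [("aws_managed", aws),
   ("customer_managed", service_names.filter (fun n => !PySem.Str.startswith n "com.amazonaws"))]
  ++ pvTypeTable.map (fun p => (p.1, aws.filter (fun n => pvTypeOf n == p.1)))
  ++ [("other", aws.filter (fun n => pvTypeOf n == "other"))]

-- ===== PRECONDITION & SPEC =====
def Spec_categorize_available_services_py (service_names : List String) (out : List (String × List String)) : Prop := out = categorize_available_services_py_alt service_names
instance (service_names : List String) (out : List (String × List String)) : Decidable (Spec_categorize_available_services_py service_names out) := by unfold Spec_categorize_available_services_py; infer_instance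

-- ===== CLAIM (what is proved, stated in full; the proofs are below) =====
def Claim_equal_categorize_available_services_py : Prop := ∀ (service_names : List String), Dom_categorize_available_services_py service_names → Spec_categorize_available_services_py service_names (categorize_available_services_py service_names)

-- ===== LEMMAS AND PROOFS =====

-- loop invariant: A's fold over any 8-key accumulator dict appends the corresponding filters
set_option maxHeartbeats 1000000 in
theorem pvA_loop (l : List String) (a c co st db an se ot : List String) :
    (l.foldl pvAStep (PySem.Dict.mk
      [("aws_managed", a), ("customer_managed", c), ("compute", co), ("storage", st),
       ("database", db), ("analytics", an), ("security", se), ("other", ot)])).items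
    = [("aws_managed", a ++ l.filter (fun n => PySem.Str.startswith n "com.amazonaws")),
       ("customer_managed", c ++ l.filter (fun n => !PySem.Str.startswith n "com.amazonaws")),
       ("compute", co ++ l.filter (fun n => PySem.Str.startswith n "com.amazonaws" && pvTypeOf n == "compute")),
       ("storage", st ++ l.filter (fun n => PySem.Str.startswith n "com.amazonaws" && pvTypeOf n == "storage")),
       ("database", db ++ l.filter (fun n => PySem.Str.startswith n "com.amazonaws" && pvTypeOf n == "database")),
       ("analytics", an ++ l.filter (fun n => PySem.Str.startswith n "com.amazonaws" && pvTypeOf n == "analytics")),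
       ("security", se ++ l.filter (fun n => PySem.Str.startswith n "com.amazonaws" && pvTypeOf n == "security")),
       ("other", ot ++ l.filter (fun n => PySem.Str.startswith n "com.amazonaws" && pvTypeOf n == "other"))] := by
  induction l generalizing a c co st db an se ot with
  | nil => simp
  | cons x xs ih =>
    rw [List.foldl_cons]
    by_cases hA : PySem.Str.startswith x "com.amazonaws" = true
    · by_cases h1 : (["ec2", "ecs", "lambda"].any fun k => PySem.Str.isIn k x) = true
      · have hstep : pvAStep (PySem.Dict.mk [("aws_managed", a), ("customer_managed", c), ("compute", co), ("storage", st), ("database", db), ("analytics", an), ("security", se), ("other", ot)]) x = PySem.Dict.mk [("aws_managed", a ++ [x]), ("customer_managed", c), ("compute", co ++ [x]), ("storage", st), ("database", db), ("analytics", an), ("security", se), ("other", ot)] := by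
          unfold pvAStep
          rw [if_pos hA, if_pos h1]
          simp [PySem.Dict.modify, PySem.Dict.contains, PySem.Dict.get?, PySem.Dict.getD, PySem.Dict.insert]
        have hT : pvTypeOf x = "compute" := by
          unfold pvTypeOf pvTypeTable
          simp only [List.find?_cons, h1]
        rw [hstep, ih]
        simp at hA
        simp [hA, hT]
      · by_cases h2 : (["s3", "efs", "fsx"].any fun k => PySem.Str.isIn k x) = true
        · have hstep : pvAStep (PySem.Dict.mk [("aws_managed", a), ("customer_managed", c), ("compute", co), ("storage", st), ("database", db), ("analytics", an), ("security", se), ("other", ot)]) x = PySem.Dict.mk [("aws_managed", a ++ [x]), ("customer_managed", c), ("compute", co), ("storage", st ++ [x]), ("database", db), ("analytics", an), ("security", se), ("other", ot)] := by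
            unfold pvAStep
            rw [if_pos hA, if_neg h1, if_pos h2]
            simp [PySem.Dict.modify, PySem.Dict.contains, PySem.Dict.get?, PySem.Dict.getD, PySem.Dict.insert]
          simp only [Bool.not_eq_true] at h1
          have hT : pvTypeOf x = "storage" := by
            unfold pvTypeOf pvTypeTable
            simp only [List.find?_cons, h1, h2]
          rw [hstep, ih]
          simp at hA
          simp [hA, hT]
        · by_cases h3 : (["rds", "dynamodb", "redshift"].any fun k => PySem.Str.isIn k x) = true
          · have hstep : pvAStep (PySem.Dict.mk [("aws_managed", a), ("customer_managed", c), ("compute", co), ("storage", st), ("database", db), ("analytics", an), ("security", se), ("other", ot)]) x = PySem.Dict.mk [("aws_managed", a ++ [x]), ("customer_managed", c), ("compute", co), ("storage", st), ("database", db ++ [x]), ("analytics", an), ("security", se), ("other", ot)] := by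
              unfold pvAStep
              rw [if_pos hA, if_neg h1, if_neg h2, if_pos h3]
              simp [PySem.Dict.modify, PySem.Dict.contains, PySem.Dict.get?, PySem.Dict.getD, PySem.Dict.insert]
            simp only [Bool.not_eq_true] at h1 h2
            have hT : pvTypeOf x = "database" := by
              unfold pvTypeOf pvTypeTable
              simp only [List.find?_cons, h1, h2, h3]
            rw [hstep, ih]
            simp at hA
            simp [hA, hT]
          · by_cases h4 : (["kinesis", "glue", "emr"].any fun k => PySem.Str.isIn k x) = true
            · have hstep : pvAStep (PySem.Dict.mk [("aws_managed", a), ("customer_managed", c), ("compute", co), ("storage", st), ("database", db), ("analytics", an), ("security", se), ("other", ot)]) x = PySem.Dict.mk [("aws_managed", a ++ [x]), ("customer_managed", c), ("compute", co), ("storage", st), ("database", db), ("analytics", an ++ [x]), ("security", se), ("other", ot)] := by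
                unfold pvAStep
                rw [if_pos hA, if_neg h1, if_neg h2, if_neg h3, if_pos h4]
                simp [PySem.Dict.modify, PySem.Dict.contains, PySem.Dict.get?, PySem.Dict.getD, PySem.Dict.insert]
              simp only [Bool.not_eq_true] at h1 h2 h3
              have hT : pvTypeOf x = "analytics" := by
                unfold pvTypeOf pvTypeTable
                simp only [List.find?_cons, h1, h2, h3, h4]
              rw [hstep, ih]
              simp at hA
              simp [hA, hT]
            · by_cases h5 : (["kms", "secretsmanager", "ssm"].any fun k => PySem.Str.isIn k x) = true
              · have hstep : pvAStep (PySem.Dict.mk [("aws_managed", a), ("customer_managed", c), ("compute", co), ("storage", st), ("database", db), ("analytics", an), ("security", se), ("other", ot)]) x = PySem.Dict.mk [("aws_managed", a ++ [x]), ("customer_managed", c), ("compute", co), ("storage", st), ("database", db), ("analytics", an), ("security", se ++ [x]), ("other", ot)] := by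
                  unfold pvAStep
                  rw [if_pos hA, if_neg h1, if_neg h2, if_neg h3, if_neg h4, if_pos h5]
                  simp [PySem.Dict.modify, PySem.Dict.contains, PySem.Dict.get?, PySem.Dict.getD, PySem.Dict.insert]
                simp only [Bool.not_eq_true] at h1 h2 h3 h4
                have hT : pvTypeOf x = "security" := by
                  unfold pvTypeOf pvTypeTable
                  simp only [List.find?_cons, h1, h2, h3, h4, h5]
                rw [hstep, ih]
                simp at hA
                simp [hA, hT]
              · have hstep : pvAStep (PySem.Dict.mk [("aws_managed", a), ("customer_managed", c), ("compute", co), ("storage", st), ("database", db), ("analytics", an), ("security", se), ("other", ot)]) x = PySem.Dict.mk [("aws_managed", a ++ [x]), ("customer_managed", c), ("compute", co), ("storage", st), ("database", db), ("analytics", an), ("security", se), ("other", ot ++ [x])] := by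
                  unfold pvAStep
                  rw [if_pos hA, if_neg h1, if_neg h2, if_neg h3, if_neg h4, if_neg h5]
                  simp [PySem.Dict.modify, PySem.Dict.contains, PySem.Dict.get?, PySem.Dict.getD, PySem.Dict.insert]
                simp only [Bool.not_eq_true] at h1 h2 h3 h4 h5
                have hT : pvTypeOf x = "other" := by
                  unfold pvTypeOf pvTypeTable
                  simp only [List.find?_cons, List.find?_nil, h1, h2, h3, h4, h5]
                rw [hstep, ih]
                simp at hA
                simp [hA, hT]
    · have hstep : pvAStep (PySem.Dict.mk [("aws_managed", a), ("customer_managed", c), ("compute", co), ("storage", st), ("database", db), ("analytics", an), ("security", se), ("other", ot)]) x = PySem.Dict.mk [("aws_managed", a), ("customer_managed", c ++ [x]), ("compute", co), ("storage", st), ("database", db), ("analytics", an), ("security", se), ("other", ot)] := by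
        unfold pvAStep
        rw [if_neg hA]
        simp [PySem.Dict.modify, PySem.Dict.contains, PySem.Dict.get?, PySem.Dict.getD, PySem.Dict.insert]
      rw [hstep, ih]
      simp at hA
      simp [hA]

theorem pvFilter_filter (l : List String) (p q : String → Bool) :
    l.filter (fun n => p n && q n) = l.filter (fun n => q n && p n) :=
  List.filter_congr (fun _ _ => Bool.and_comm _ _)

-- ===== VERDICT (by name: the statement is the Claim_ definition above) =====
theorem categorize_available_services_py_spec : Claim_equal_categorize_available_services_py := by
  intro l _
  unfold Spec_categorize_available_services_py
  show (l.foldl pvAStep _).items = _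
  rw [pvA_loop]
  simp [categorize_available_services_py_alt, pvTypeTable]
  refine ⟨?_, ?_, ?_, ?_, ?_, ?_⟩ <;> exact pvFilter_filter _ _ _
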